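-- pv_equiv track=rewrite | github.com/brain-score/vision | brainscore_vision/models/robustness-networks-submission_2/models/model_metamers_pytorch/robustness/tools/helpers.py | custom_label_mapping
-- ===== SOURCE A (Python) =====
-- def custom_label_mapping(classes, class_to_idx, ranges):
--
--     mapping = {}
--     for class_name, idx in class_to_idx.items():
--         for new_idx, range_set in enumerate(ranges):
--             if idx in range_set:
--                 mapping[class_name] = new_idx
--
--     filtered_classes = list(mapping.keys()).sort()
--     return filtered_classes, mapping
-- ===== SOURCE B (Python) =====
-- def custom_label_mapping(classes, class_to_idx, ranges):
--     # Invert the ranges once: idx -> its (last) group index, then one pass over class_to_idx.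
--     idx_map = {}
--     for new_idx, range_set in enumerate(ranges):
--         for v in range_set:
--             idx_map[v] = new_idx
--
--     mapping = {}
--     for class_name, idx in class_to_idx.items():
--         if idx in idx_map:
--             mapping[class_name] = idx_map[idx]
--
--     filtered_classes = list(mapping.keys()).sort()
--     return filtered_classes, mapping
-- ===== Notes on version B (the rewrite author's own statement) =====
-- stated objective: faster
-- what changed: B builds an inverted dictionary idx->last group index from the ranges once, then assigns each class in a single pass over class_to_idx, instead of scanning every range for every class.
import Mathlib
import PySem

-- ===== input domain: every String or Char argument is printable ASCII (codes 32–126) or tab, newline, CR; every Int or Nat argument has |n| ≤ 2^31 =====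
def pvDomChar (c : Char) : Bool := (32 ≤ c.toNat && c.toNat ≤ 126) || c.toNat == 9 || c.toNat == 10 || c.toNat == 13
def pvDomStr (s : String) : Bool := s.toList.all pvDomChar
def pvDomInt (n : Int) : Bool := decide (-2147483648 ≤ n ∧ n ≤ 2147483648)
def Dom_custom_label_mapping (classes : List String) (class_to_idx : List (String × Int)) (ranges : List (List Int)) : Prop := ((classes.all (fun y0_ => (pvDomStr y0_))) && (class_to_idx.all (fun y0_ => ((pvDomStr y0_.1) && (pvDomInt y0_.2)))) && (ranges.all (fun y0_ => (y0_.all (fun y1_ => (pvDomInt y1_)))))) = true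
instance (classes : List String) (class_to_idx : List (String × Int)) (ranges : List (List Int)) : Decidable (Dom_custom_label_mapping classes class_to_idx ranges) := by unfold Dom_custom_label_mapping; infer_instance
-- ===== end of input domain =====

-- B inverts the ranges once into an idx→group dictionary and then makes a single pass over
-- class_to_idx, instead of scanning every range for every class (objective: faster, asymptotic).

-- ===== PORT A =====
-- A: for each (class_name, idx) of the dict, scan all ranges; the last range containing idx wins.
-- 'list(mapping.keys()).sort()' returns None, so the first component is always none.
def custom_label_mapping (classes : List String) (class_to_idx : List (String × Int)) (ranges : List (List Int)) : Option (List String) × (List (String × Int)) :=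
  let mapping : PySem.Dict String Int :=
    (PySem.Dict.ofList class_to_idx).items.foldl
      (fun m p =>
        (PySem.List.enumerate ranges).foldl
          (fun m q => if p.2 ∈ q.2 then m.insert p.1 q.1 else m) m)
      PySem.Dict.empty
  (none, mapping.items)

-- ===== PORT B =====
def custom_label_mapping_alt (classes : List String) (class_to_idx : List (String × Int)) (ranges : List (List Int)) : Option (List String) × (List (String × Int)) :=
  let idxMap : PySem.Dict Int Int :=
    (PySem.List.enumerate ranges).foldl
      (fun im q => q.2.foldl (fun im v => im.insert v q.1) im)
      PySem.Dict.empty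
  let mapping : PySem.Dict String Int :=
    (PySem.Dict.ofList class_to_idx).items.foldl
      (fun m p =>
        match idxMap.get? p.2 with
        | some ni => m.insert p.1 ni
        | none => m)
      PySem.Dict.empty
  (none, mapping.items)

-- ===== PRECONDITION & SPEC =====
def Spec_custom_label_mapping (classes : List String) (class_to_idx : List (String × Int)) (ranges : List (List Int)) (out : Option (List String) × (List (String × Int))) : Prop := out = custom_label_mapping_alt classes class_to_idx ranges
instance (classes : List String) (class_to_idx : List (String × Int)) (ranges : List (List Int)) (out : Option (List String) × (List (String × Int))) : Decidable (Spec_custom_label_mapping classes class_to_idx ranges out) := by unfold Spec_custom_label_mapping; infer_instance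

-- ===== CLAIM (what is proved, stated in full; the proofs are below) =====
def Claim_equal_custom_label_mapping : Prop := ∀ (classes : List String) (class_to_idx : List (String × Int)) (ranges : List (List Int)), Dom_custom_label_mapping classes class_to_idx ranges → Spec_custom_label_mapping classes class_to_idx ranges (custom_label_mapping classes class_to_idx ranges)

-- ===== LEMMAS AND PROOFS =====

-- 'last group index whose range contains idx', as a fold
def pvLastM (idx : Int) (l : List (Int × List Int)) (a : Option Int) : Option Int :=
  l.foldl (fun a q => if idx ∈ q.2 then some q.1 else a) a

theorem pvLastM_acc (idx : Int) (l : List (Int × List Int)) (a : Option Int) :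
    pvLastM idx l a = match pvLastM idx l none with
      | some x => some x
      | none => a := by
  induction l generalizing a with
  | nil => simp [pvLastM]
  | cons q t ih =>
    simp only [pvLastM, List.foldl_cons] at *
    rw [ih, ih (if idx ∈ q.2 then some q.1 else none)]
    cases h : t.foldl (fun a q => if idx ∈ q.2 then some q.1 else a) none <;>
      split_ifs <;> simp

-- A's inner scan over the ranges equals one insert at the last matching group (or no-op)
theorem pvInnerA_eq (idx : Int) (cn : String) (l : List (Int × List Int))
    (m : PySem.Dict String Int) :
    l.foldl (fun m q => if idx ∈ q.2 then m.insert cn q.1 else m) m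
      = match pvLastM idx l none with
        | some ni => m.insert cn ni
        | none => m := by
  induction l generalizing m with
  | nil => simp [pvLastM]
  | cons q t ih =>
    simp only [List.foldl_cons]
    rw [ih]
    have hacc := pvLastM_acc idx t (if idx ∈ q.2 then some q.1 else none)
    have : pvLastM idx (q :: t) none
        = pvLastM idx t (if idx ∈ q.2 then some q.1 else none) := by
      simp [pvLastM]
    rw [this, hacc]
    cases h : pvLastM idx t none <;> split_ifs <;>
      simp [PySem.Dict.insert_insert_self]

-- one range's insert loop, looked up afterwards
theorem pvRangeFold_get (idx ni : Int) (rs : List Int) (im : PySem.Dict Int Int) :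
    (rs.foldl (fun im v => im.insert v ni) im).get? idx
      = if idx ∈ rs then some ni else im.get? idx := by
  induction rs generalizing im with
  | nil => simp
  | cons v t ih =>
    simp only [List.foldl_cons]
    rw [ih]
    by_cases hv : idx = v <;> by_cases ht : idx ∈ t <;>
      simp [hv, ht, PySem.Dict.get?_insert]

-- B's inverted index, looked up at idx, is exactly the last matching group index
theorem pvIdxMap_get (idx : Int) (l : List (Int × List Int)) (im : PySem.Dict Int Int) :
    (l.foldl (fun im q => q.2.foldl (fun im v => im.insert v q.1) im) im).get? idx
      = match pvLastM idx l none with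
        | some x => some x
        | none => im.get? idx := by
  induction l generalizing im with
  | nil => simp [pvLastM]
  | cons q t ih =>
    simp only [List.foldl_cons]
    rw [ih]
    have : pvLastM idx (q :: t) none
        = pvLastM idx t (if idx ∈ q.2 then some q.1 else none) := by
      simp [pvLastM]
    rw [this, pvLastM_acc idx t (if idx ∈ q.2 then some q.1 else none)]
    cases h : pvLastM idx t none <;> split_ifs <;>
      simp [pvRangeFold_get, *]

-- ===== VERDICT (by name: the statement is the Claim_ definition above) =====
theorem custom_label_mapping_spec : Claim_equal_custom_label_mapping := by
  intro classes class_to_idx ranges _hdom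
  unfold Spec_custom_label_mapping custom_label_mapping custom_label_mapping_alt
  have hfun : (fun (m : PySem.Dict String Int) (p : String × Int) =>
        (PySem.List.enumerate ranges).foldl
          (fun m q => if p.2 ∈ q.2 then m.insert p.1 q.1 else m) m)
      = (fun (m : PySem.Dict String Int) (p : String × Int) =>
        match ((PySem.List.enumerate ranges).foldl
            (fun im q => q.2.foldl (fun im v => im.insert v q.1) im)
            (PySem.Dict.empty : PySem.Dict Int Int)).get? p.2 with
        | some ni => m.insert p.1 ni
        | none => m) := by
    funext m p
    rw [pvInnerA_eq p.2 p.1 (PySem.List.enumerate ranges) m,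
        pvIdxMap_get p.2 (PySem.List.enumerate ranges) PySem.Dict.empty]
    cases pvLastM p.2 (PySem.List.enumerate ranges) none <;> simp
  simp only [hfun]
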